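-- pv_equiv track=rewrite | github.com/strawberry-souffle/ZooPark | FuckAround/-2.FlowerShop.py | evaluate
-- ===== SOURCE A (Python) =====
-- def evaluate(k, flowers: list[int]):
--     def recurDown(flowers):
--         if len(flowers) < k:
--             return 0
--         for i in range(0, k):
--             flowers[i] -= 1
--         return 1 + recurDown([i for i in flowers if i > 0])
--     return recurDown(flowers)
-- ===== SOURCE B (Python) =====
-- def evaluate(k, flowers: list[int]):
--     # Batched rounds: subtract min of the front-k window in one step instead of
--     # one round at a time. Return value only: unlike A, does not mutate `flowers`.
--     fl = flowers
--     count = 0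
--     while len(fl) >= k:
--         step = max(min(fl[:k]), 1)
--         count += step
--         fl = [x - step for x in fl[:k] if x > step] + [x for x in fl[k:] if x > 0]
--     return count
-- ===== Notes on version B (the rewrite author's own statement) =====
-- stated objective: alternative
-- what changed: A simulates the rounds one by one (recursive calls, each decrementing the front-k by 1 and filtering the whole list); B is an iterative loop that batches all rounds up to the next removal into a single step, subtracting max(min(front-k), 1) at once.
import Mathlib
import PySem

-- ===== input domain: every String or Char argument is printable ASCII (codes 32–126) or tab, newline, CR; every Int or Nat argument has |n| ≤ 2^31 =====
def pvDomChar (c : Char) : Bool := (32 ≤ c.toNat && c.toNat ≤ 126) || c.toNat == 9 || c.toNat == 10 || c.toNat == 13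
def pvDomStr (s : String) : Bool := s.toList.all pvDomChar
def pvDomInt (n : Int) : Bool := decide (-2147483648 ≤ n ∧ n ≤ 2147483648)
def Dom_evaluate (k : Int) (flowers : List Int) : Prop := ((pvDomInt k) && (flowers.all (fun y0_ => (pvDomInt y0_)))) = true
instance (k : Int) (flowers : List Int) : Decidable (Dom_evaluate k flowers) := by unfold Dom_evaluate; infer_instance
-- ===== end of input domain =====

-- B batches A's one-by-one rounds (subtract the min of the front-k window at once); equal RETURN value only —
-- A mutates its argument list in place (decrements the first k entries), B does not.

-- ===== PORT A =====
-- measure used only for termination of the ports (both shrink it each iteration)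
def pvMu (l : List Int) : Nat := (l.map Int.toNat).sum + l.length

-- the in-place loop `for i in range(0, k): flowers[i] -= 1`
def pvDecFirst : Nat → List Int → List Int
  | _, [] => []
  | 0, l => l
  | n+1, x :: xs => (x - 1) :: pvDecFirst n xs

theorem pvMu_filter_le (p : Int → Bool) (l : List Int) : pvMu (l.filter p) ≤ pvMu l := by
  induction l with
  | nil => simp [pvMu]
  | cons x xs ih =>
    simp only [List.filter_cons]
    split
    · simp [pvMu] at ih ⊢; omega
    · simp [pvMu] at ih ⊢; omega

theorem pvMu_decA_le (n : Nat) (l : List Int) :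
    pvMu ((pvDecFirst n l).filter (fun x => decide (0 < x))) ≤ pvMu l := by
  induction l generalizing n with
  | nil => cases n <;> simp [pvDecFirst, pvMu]
  | cons x xs ih =>
    cases n with
    | zero => simpa [pvDecFirst] using pvMu_filter_le (fun x => decide (0 < x)) (x :: xs)
    | succ m =>
      have h := ih m
      simp only [pvDecFirst, List.filter_cons]
      split <;> rename_i hc <;> simp at hc <;> simp [pvMu] at h ⊢ <;> omega

theorem pvMu_decA_lt (n : Nat) (l : List Int) (hn : 1 ≤ n) (hl : l ≠ []) :
    pvMu ((pvDecFirst n l).filter (fun x => decide (0 < x))) < pvMu l := by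
  cases l with
  | nil => exact absurd rfl hl
  | cons x xs =>
    cases n with
    | zero => omega
    | succ m =>
      have h := pvMu_decA_le m xs
      simp only [pvDecFirst, List.filter_cons]
      split <;> rename_i hc <;> simp at hc <;> simp [pvMu] at h ⊢ <;> omega

-- A's inner recursive function `recurDown`
def pvRecurDown (k : Int) (flowers : List Int) : Int :=
  if _h1 : k ≤ 0 then 0  -- totality guard: for k ≤ 0 the Python recurses forever (outside Pre_)
  else if _h2 : (flowers.length : Int) < k then 0
  else 1 + pvRecurDown k ((pvDecFirst k.toNat flowers).filter (fun x => decide (0 < x)))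
termination_by pvMu flowers
decreasing_by
  exact pvMu_decA_lt k.toNat flowers (by omega)
    (by intro h; subst h; simp at _h2; omega)

def evaluate (k : Int) (flowers : List Int) : Int := pvRecurDown k flowers

-- ===== PORT B =====
-- step = max(min(fl[:k]), 1)
def pvStep (k : Int) (fl : List Int) : Int :=
  max ((PySem.List.min? (fl.take k.toNat) (fun x => x)).getD 0) 1

-- fl = [x - step for x in fl[:k] if x > step] + [x for x in fl[k:] if x > 0]
def pvNextB (k : Int) (fl : List Int) : List Int :=
  ((fl.take k.toNat).filter (fun x => decide (pvStep k fl < x))).map (fun x => x - pvStep k fl)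
    ++ (fl.drop k.toNat).filter (fun x => decide (0 < x))

theorem pvMu_append (a b : List Int) : pvMu (a ++ b) = pvMu a + pvMu b := by
  simp [pvMu]; omega

theorem pvMu_shrink_le (s : Int) (hs : 1 ≤ s) (l : List Int) :
    pvMu ((l.filter (fun x => decide (s < x))).map (fun x => x - s)) ≤ pvMu l := by
  induction l with
  | nil => simp [pvMu]
  | cons x xs ih =>
    simp only [List.filter_cons]
    split <;> rename_i hc <;> simp at hc <;> simp [pvMu] at ih ⊢ <;> omega

theorem pvMu_shrink_lt (s : Int) (hs : 1 ≤ s) (l : List Int) (hl : l ≠ []) :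
    pvMu ((l.filter (fun x => decide (s < x))).map (fun x => x - s)) < pvMu l := by
  cases l with
  | nil => exact absurd rfl hl
  | cons x xs =>
    have h := pvMu_shrink_le s hs xs
    simp only [List.filter_cons]
    split <;> rename_i hc <;> simp at hc <;> simp [pvMu] at h ⊢ <;> omega

theorem pvStep_ge_one (k : Int) (fl : List Int) : 1 ≤ pvStep k fl := le_max_right _ _

theorem pvMu_nextB_lt (k : Int) (fl : List Int) (hk : 0 < k) (hlen : (k : Int) ≤ fl.length) :
    pvMu (pvNextB k fl) < pvMu fl := by
  have htake : fl.take k.toNat ≠ [] := by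
    simp only [ne_eq, List.take_eq_nil_iff]
    push Not
    constructor
    · omega
    · intro h; subst h; simp at hlen; omega
  have h1 := pvMu_shrink_lt (pvStep k fl) (pvStep_ge_one k fl) (fl.take k.toNat) htake
  have h2 := pvMu_filter_le (fun x => decide (0 < x)) (fl.drop k.toNat)
  have h3 : pvMu (fl.take k.toNat) + pvMu (fl.drop k.toNat) = pvMu fl := by
    rw [← pvMu_append, List.take_append_drop]
  rw [pvNextB, pvMu_append]
  omega

-- B's while loop (count accumulator)
def pvAltLoop (k : Int) (count : Int) (fl : List Int) : Int :=
  if _h1 : k ≤ 0 then count  -- totality guard: for k ≤ 0 the Python's min([]) raises (outside Pre_)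
  else if _h2 : (fl.length : Int) < k then count
  else pvAltLoop k (count + pvStep k fl) (pvNextB k fl)
termination_by pvMu fl
decreasing_by
  exact pvMu_nextB_lt k fl (by omega) (by omega)

def evaluate_alt (k : Int) (flowers : List Int) : Int := pvAltLoop k 0 flowers

-- ===== PRECONDITION & SPEC =====
-- Pre_ excludes only k ≤ 0, on which A never returns (it recurses forever / RecursionError).
def Pre_evaluate (k : Int) (flowers : List Int) : Prop := 1 ≤ k
instance (k : Int) (flowers : List Int) : Decidable (Pre_evaluate k flowers) := by
  unfold Pre_evaluate; infer_instance
def pvWitness_evaluate : Int × List Int := (2, [3, 1, 4])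

def Spec_evaluate (k : Int) (flowers : List Int) (out : Int) : Prop := out = evaluate_alt k flowers
instance (k : Int) (flowers : List Int) (out : Int) : Decidable (Spec_evaluate k flowers out) := by
  unfold Spec_evaluate; infer_instance

-- ===== CLAIM (what is proved, stated in full; the proofs are below) =====
def Claim_equal_evaluate : Prop := ∀ (k : Int) (flowers : List Int), Dom_evaluate k flowers → Pre_evaluate k flowers → Spec_evaluate k flowers (evaluate k flowers)

-- ===== LEMMAS AND PROOFS =====

theorem pvDecFirst_eq (n : Nat) (l : List Int) :
    pvDecFirst n l = (l.take n).map (fun x => x - 1) ++ l.drop n := by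
  induction l generalizing n with
  | nil => cases n <;> simp [pvDecFirst]
  | cons x xs ih => cases n <;> simp [pvDecFirst, ih]

-- one A-round shape: decrement front-k then filter positives
theorem pvNextA_eq (k : Int) (fl : List Int) :
    (pvDecFirst k.toNat fl).filter (fun x => decide (0 < x)) =
      ((fl.take k.toNat).filter (fun x => decide ((1:Int) < x))).map (fun x => x - 1)
        ++ (fl.drop k.toNat).filter (fun x => decide (0 < x)) := by
  rw [pvDecFirst_eq, List.filter_append, List.filter_map]
  congr 1
  congr 1
  apply List.filter_congr
  intro x _
  simp only [Function.comp_apply, decide_eq_decide]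
  omega

theorem pvFoldl_min_sub (s : Int) (t : List Int) : ∀ (x : Int),
    (t.map (fun y => y - s)).foldl min (x - s) = (t.foldl min x) - s := by
  induction t with
  | nil => intro x; simp
  | cons a t ih =>
    intro x
    simp only [List.map_cons, List.foldl_cons]
    rw [show min (x - s) (a - s) = min x a - s by omega]
    exact ih (min x a)

theorem pvBatch : ∀ (N : Nat) (k : Int) (fl : List Int), 0 < k → (k : Int) ≤ fl.length →
    pvMu fl ≤ N → pvRecurDown k fl = pvStep k fl + pvRecurDown k (pvNextB k fl) := by
  intro N
  induction N with
  | zero =>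
    intro k fl hk hlen hmu
    have : fl.length ≤ pvMu fl := Nat.le_add_left _ _
    omega
  | succ N ih =>
    intro k fl hk hlen hmu
    obtain ⟨x, t, hft⟩ : ∃ x t, fl.take k.toNat = x :: t := by
      cases h : fl.take k.toNat with
      | nil =>
        rw [List.take_eq_nil_iff] at h
        rcases h with h | h
        · omega
        · subst h; simp at hlen; omega
      | cons x t => exact ⟨x, t, rfl⟩
    have hmin : PySem.List.min? (fl.take k.toNat) (fun y => y) = some (t.foldl min x) := by
      rw [hft]; exact PySem.List.min?_id_cons x t
    set m := t.foldl min x with hm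
    have hstep : pvStep k fl = max m 1 := by simp [pvStep, hmin]
    have hallmem : ∀ y ∈ fl.take k.toNat, m ≤ y := by
      intro y hy
      simpa using PySem.List.min?_isMin hmin y hy
    have hunfold : pvRecurDown k fl =
        1 + pvRecurDown k ((pvDecFirst k.toNat fl).filter (fun x => decide (0 < x))) := by
      rw [pvRecurDown, dif_neg (by omega), dif_neg (by omega)]
    by_cases hm2 : m ≤ 1
    · have hstep1 : pvStep k fl = 1 := by rw [hstep]; omega
      have hnb : pvNextB k fl =
          ((fl.take k.toNat).filter (fun x => decide ((1:Int) < x))).map (fun x => x - 1)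
            ++ (fl.drop k.toNat).filter (fun x => decide (0 < x)) := by
        simp [pvNextB, hstep1]
      rw [hunfold, pvNextA_eq, hnb, hstep1]
    · push Not at hm2
      have hstepm : pvStep k fl = m := by rw [hstep]; omega
      set fl₁ := (fl.take k.toNat).map (fun x => x - 1)
          ++ (fl.drop k.toNat).filter (fun x => decide (0 < x)) with hfl₁
      have hnextA : (pvDecFirst k.toNat fl).filter (fun x => decide (0 < x)) = fl₁ := by
        rw [pvDecFirst_eq, List.filter_append, hfl₁]
        congr 1
        apply List.filter_eq_self.mpr
        intro y hy
        rw [List.mem_map] at hy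
        obtain ⟨z, hz, rfl⟩ := hy
        have := hallmem z hz
        simp only [decide_eq_true_eq]
        omega
      have hKlen : k.toNat ≤ fl.length := by omega
      have hlen_take : ((fl.take k.toNat).map (fun x => x - 1)).length = k.toNat := by
        rw [List.length_map, List.length_take]; omega
      have htake₁ : fl₁.take k.toNat = (fl.take k.toNat).map (fun x => x - 1) := by
        rw [hfl₁, List.take_left' hlen_take]
      have hdrop₁ : fl₁.drop k.toNat = (fl.drop k.toNat).filter (fun x => decide (0 < x)) := by
        rw [hfl₁, List.drop_left' hlen_take]
      have hlen₁ : (k : Int) ≤ fl₁.length := by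
        rw [hfl₁, List.length_append, hlen_take]; omega
      have hmin₁ : PySem.List.min? (fl₁.take k.toNat) (fun y => y) = some (m - 1) := by
        rw [htake₁, hft, List.map_cons, PySem.List.min?_id_cons, hm, pvFoldl_min_sub]
      have hstep₁ : pvStep k fl₁ = m - 1 := by
        simp [pvStep, hmin₁]; omega
      have hμ₁ : pvMu fl₁ ≤ N := by
        have h1 : pvMu fl₁ < pvMu fl := by
          rw [← hnextA]
          exact pvMu_decA_lt k.toNat fl (by omega)
            (by intro h; subst h; simp at hlen; omega)
        omega
      have hrec := ih k fl₁ hk hlen₁ hμ₁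
      have hNB : pvNextB k fl₁ = pvNextB k fl := by
        rw [pvNextB, pvNextB, hstep₁, hstepm, htake₁, hdrop₁]
        congr 1
        · rw [List.filter_map, List.map_map]
          rw [List.filter_congr (l := fl.take k.toNat)
            (q := fun x => decide (m < x))
            (by intro x _; simp only [Function.comp_apply, decide_eq_decide]; omega)]
          apply List.map_congr_left
          intro x _
          simp only [Function.comp_apply]
          omega
        · rw [List.filter_filter]
          apply List.filter_congr
          intro x _
          simp
      rw [hunfold, hnextA, hrec, hNB, hstepm, hstep₁]
      generalize pvRecurDown k (pvNextB k fl) = r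
      omega

theorem pvLoop : ∀ (N : Nat) (k c : Int) (fl : List Int), 0 < k → pvMu fl ≤ N →
    pvAltLoop k c fl = c + pvRecurDown k fl := by
  intro N
  induction N with
  | zero =>
    intro k c fl hk hmu
    have : fl.length ≤ pvMu fl := Nat.le_add_left _ _
    have hlt : (fl.length : Int) < k := by omega
    rw [pvAltLoop, pvRecurDown, dif_neg (by omega), dif_pos hlt, dif_neg (by omega), dif_pos hlt]
    omega
  | succ N ih =>
    intro k c fl hk hmu
    by_cases hlt : (fl.length : Int) < k
    · rw [pvAltLoop, pvRecurDown, dif_neg (by omega), dif_pos hlt, dif_neg (by omega), dif_pos hlt]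
      omega
    · have hlen : (k : Int) ≤ fl.length := by omega
      have hdec := pvMu_nextB_lt k fl hk hlen
      rw [pvAltLoop, dif_neg (by omega), dif_neg hlt]
      rw [ih k (c + pvStep k fl) (pvNextB k fl) hk (by omega)]
      rw [pvBatch (pvMu fl) k fl hk hlen le_rfl]
      ring

-- ===== VERDICT (by name: the statement is the Claim_ definition above) =====
theorem evaluate_spec : Claim_equal_evaluate := by
  intro k fl _hdom hpre
  unfold Spec_evaluate evaluate evaluate_alt
  rw [pvLoop (pvMu fl) k 0 fl (by exact hpre) le_rfl]
  omega
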